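-- pv_equiv track=rewrite | github.com/shubhammane77/agentic-poc | src/agentic_testgen/execution/tools.py | _count_declared_junit_tests
-- ===== SOURCE A (Python) =====
-- _JUNIT_METHOD_ANNOTATIONS = {"Test", "ParameterizedTest", "RepeatedTest", "TestFactory", "TestTemplate"}
--
-- def _is_junit_method_annotation(line: str) -> bool:
--     stripped = line.strip()
--     if not stripped.startswith("@"):
--         return False
--     token = stripped[1:].split("(", 1)[0].strip()
--     if not token:
--         return False
--     return token.split(".")[-1] in _JUNIT_METHOD_ANNOTATIONS
--
-- def _count_declared_junit_tests(content: str) -> int: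
--     count = 0
--     pending_annotation = False
--     for line in content.splitlines():
--         stripped = line.strip()
--         if not stripped or stripped.startswith("//"):
--             continue
--         if _is_junit_method_annotation(stripped):
--             pending_annotation = True
--             continue
--         if pending_annotation and stripped.startswith("@"):
--             continue
--         if pending_annotation and _looks_like_java_method_declaration(stripped):
--             count += 1
--             pending_annotation = False
--             continue
--         pending_annotation = False
--     return count
--
-- def _looks_like_java_method_declaration(line: str) -> bool:
--     if "(" not in line or ")" not in line:
--         return False
--     if ";" in line:
--         return False
--     disallowed = ("class ", "interface ", "enum ", "record ", "if ", "for ", "while ", "switch ", "catch ")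
--     if any(token in line for token in disallowed):
--         return False
--     before_paren = line.split("(", 1)[0].strip()
--     if not before_paren:
--         return False
--     return " " in before_paren
-- ===== SOURCE B (Python) =====
-- _JUNIT_METHOD_ANNOTATIONS = ("TestTemplate", "TestFactory", "RepeatedTest", "ParameterizedTest", "Test")
--
--
-- def _is_junit_annotation_line(s):
--     # s is an already-stripped (cleaned) line
--     if not s.startswith("@"):
--         return False
--     token = s[1:].split("(", 1)[0].strip()
--     return token != "" and token.split(".")[-1] in _JUNIT_METHOD_ANNOTATIONS
--
--
-- def _is_method_decl_line(s):
--     head = s.split("(", 1)[0].strip()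
--     bad = ("class ", "interface ", "enum ", "record ", "if ", "for ", "while ", "switch ", "catch ")
--     return ("(" in s and ")" in s and ";" not in s
--             and not any(k in s for k in bad)
--             and head != "" and " " in head)
--
--
-- def _annotation_run_has_junit(prefix):
--     # scan the lines immediately above a declaration, nearest first; the contiguous
--     # annotation run must contain a JUnit method annotation
--     for s in reversed(prefix):
--         if not s.startswith("@"):
--             return False
--         if _is_junit_annotation_line(s):
--             return True
--     return False
--
--
-- def _count_declared_junit_tests(content):
--     cleaned = [t for t in (l.strip() for l in content.splitlines()) if t and not t.startswith("//")]
--     total = 0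
--     for i, s in enumerate(cleaned):
--         if not s.startswith("@") and _is_method_decl_line(s) and _annotation_run_has_junit(cleaned[:i]):
--             total += 1
--     return total
-- ===== Notes on version B (the rewrite author's own statement) =====
-- stated objective: alternative
-- what changed: Replaces A's one-pass pending-flag state machine over raw lines by a staged decomposition with its own helper predicates: first build the cleaned line list (stripped, blank/comment lines dropped), then for each method-declaration line scan backward over the contiguous run of annotation lines directly above it and count it iff that run contains a JUnit method annotation; the line predicates are reformulated as single boolean conjunctions over head/last split components instead of A's early-return chains with split-indexing.
import Mathlib
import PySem

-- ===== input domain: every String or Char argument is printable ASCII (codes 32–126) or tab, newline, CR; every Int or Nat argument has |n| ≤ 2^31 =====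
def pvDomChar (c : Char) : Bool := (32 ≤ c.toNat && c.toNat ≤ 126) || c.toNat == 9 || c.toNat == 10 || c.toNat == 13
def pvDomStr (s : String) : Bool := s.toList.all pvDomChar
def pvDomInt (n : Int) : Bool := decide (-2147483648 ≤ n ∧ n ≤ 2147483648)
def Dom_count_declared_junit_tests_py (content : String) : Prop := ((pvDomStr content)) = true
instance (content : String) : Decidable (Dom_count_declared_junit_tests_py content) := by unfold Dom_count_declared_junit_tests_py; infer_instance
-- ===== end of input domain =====

-- B replaces A's one-pass pending-flag state machine by a staged decomposition with
-- its own helper predicates: clean the line list first, then for each method-declaration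
-- line scan backward over the contiguous annotation run above it (objective: alternative).

-- ===== PORT A =====

-- _JUNIT_METHOD_ANNOTATIONS (a set literal of distinct strings; only membership is tested)
def pvJunitAnnotations : List String :=
  ["Test", "ParameterizedTest", "RepeatedTest", "TestFactory", "TestTemplate"]

-- _is_junit_method_annotation; split("(",1) with nonempty sep never returns none and
-- yields a nonempty list, so the [0] and [-1] indexings never raise (getD "" is dead).
def isJunitMethodAnnotation (line : String) : Bool :=
  let stripped := PySem.Str.strip line
  if !PySem.Str.startswith stripped "@" then false
  else
    let parts := (PySem.Str.splitMax? (PySem.Str.slice stripped (some 1) none) "(" 1).getD []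
    let token := PySem.Str.strip ((PySem.List.pyGet? parts 0).getD "")
    if token == "" then false
    else
      let dotParts := (PySem.Str.split? token ".").getD []
      pvJunitAnnotations.contains ((PySem.List.pyGet? dotParts (-1)).getD "")

-- _looks_like_java_method_declaration
def looksLikeJavaMethodDeclaration (line : String) : Bool :=
  if !PySem.Str.isIn "(" line || !PySem.Str.isIn ")" line then false
  else if PySem.Str.isIn ";" line then false
  else if (["class ", "interface ", "enum ", "record ", "if ", "for ", "while ", "switch ", "catch "].any
      (fun token => PySem.Str.isIn token line)) then false
  else
    let beforeParen := PySem.Str.strip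
      ((PySem.List.pyGet? ((PySem.Str.splitMax? line "(" 1).getD []) 0).getD "")
    if beforeParen == "" then false
    else PySem.Str.isIn " " beforeParen

-- _count_declared_junit_tests: one pass, state (count, pending_annotation)
def count_declared_junit_tests_py (content : String) : Int :=
  ((PySem.Str.splitlines content).foldl (fun (st : Int × Bool) line =>
      let stripped := PySem.Str.strip line
      if stripped == "" || PySem.Str.startswith stripped "//" then st
      else if isJunitMethodAnnotation stripped then (st.1, true)
      else if st.2 && PySem.Str.startswith stripped "@" then st
      else if st.2 && looksLikeJavaMethodDeclaration stripped then (st.1 + 1, false)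
      else (st.1, false)) (0, false)).1

-- ===== PORT B =====

-- _JUNIT_METHOD_ANNOTATIONS of Source B (a tuple; only membership is tested)
def pvJunitNames : List String :=
  ["TestTemplate", "TestFactory", "RepeatedTest", "ParameterizedTest", "Test"]

-- _is_junit_annotation_line: a single conjunction over the head/last split components
-- (the argument is an already-cleaned, i.e. stripped, line)
def pvIsJunitAnnotationLine (s : String) : Bool :=
  PySem.Str.startswith s "@" &&
    (let token := PySem.Str.strip
        (((PySem.Str.splitMax? (PySem.Str.slice s (some 1) none) "(" 1).getD []).headD "")
     !(token == "") &&
       pvJunitNames.contains ((((PySem.Str.split? token ".").getD []).getLast?).getD ""))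

-- _is_method_decl_line: one boolean conjunction instead of an early-return chain
def pvIsMethodDeclLine (s : String) : Bool :=
  let head := PySem.Str.strip (((PySem.Str.splitMax? s "(" 1).getD []).headD "")
  let bad : List String :=
    ["class ", "interface ", "enum ", "record ", "if ", "for ", "while ", "switch ", "catch "]
  PySem.Str.isIn "(" s && PySem.Str.isIn ")" s && !PySem.Str.isIn ";" s &&
    bad.all (fun k => !PySem.Str.isIn k s) && !(head == "") && PySem.Str.isIn " " head

-- _annotation_run_has_junit: 'for s in reversed(prefix)' as structural recursion over
-- the reversed list
def pvJunitRunRev : List String → Bool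
  | [] => false
  | s :: rest =>
    if !PySem.Str.startswith s "@" then false
    else if pvIsJunitAnnotationLine s then true
    else pvJunitRunRev rest

def pvAnnotationRunHasJunit (prefixLines : List String) : Bool :=
  pvJunitRunRev prefixLines.reverse

-- the cleaned-line comprehension of Source B
def cleanedJavaLines (content : String) : List String :=
  ((PySem.Str.splitlines content).map PySem.Str.strip).filter
    (fun t => !(t == "") && !PySem.Str.startswith t "//")

-- _count_declared_junit_tests of Source B: enumerate the cleaned lines; cleaned[:i] is a slice
def count_declared_junit_tests_py_alt (content : String) : Int :=
  let cleaned := cleanedJavaLines content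
  (PySem.List.enumerate cleaned).foldl (fun (total : Int) p =>
      if !PySem.Str.startswith p.2 "@" && pvIsMethodDeclLine p.2 &&
          pvAnnotationRunHasJunit (PySem.List.slice cleaned none (some p.1)) then total + 1
      else total) 0

-- ===== PRECONDITION & SPEC =====
def Spec_count_declared_junit_tests_py (content : String) (out : Int) : Prop := out = count_declared_junit_tests_py_alt content
instance (content : String) (out : Int) : Decidable (Spec_count_declared_junit_tests_py content out) := by unfold Spec_count_declared_junit_tests_py; infer_instance

-- ===== CLAIM (what is proved, stated in full; the proofs are below) =====
def Claim_equal_count_declared_junit_tests_py : Prop := ∀ (content : String), Dom_count_declared_junit_tests_py content → Spec_count_declared_junit_tests_py content (count_declared_junit_tests_py content)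

-- ===== LEMMAS AND PROOFS =====

-- first/last element of a list through Python indexing
lemma pv_pyGet_zero {α : Type} (l : List α) (d : α) :
    (PySem.List.pyGet? l 0).getD d = l.headD d := by
  cases l <;> simp [PySem.List.pyGet?, PySem.List.pyIdx?]

lemma pv_pyGet_neg_one {α : Type} (l : List α) (d : α) :
    (PySem.List.pyGet? l (-1)).getD d = l.getLast?.getD d := by
  cases l with
  | nil => simp [PySem.List.pyGet?, PySem.List.pyIdx?]
  | cons x xs =>
    simp [PySem.List.pyGet?, PySem.List.pyIdx?, List.getLast?_eq_getElem?]

-- the two annotation-name literals agree on membership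
lemma pv_names_agree (a : String) :
    pvJunitNames.contains a = pvJunitAnnotations.contains a := by
  simp only [pvJunitNames, pvJunitAnnotations, List.contains_eq_mem, List.mem_cons,
    List.not_mem_nil, or_false, decide_eq_decide]
  tauto

-- on stripped lines B's annotation predicate is A's
lemma pv_junit_helpers_agree {s : String} (hs : PySem.Str.strip s = s) :
    pvIsJunitAnnotationLine s = isJunitMethodAnnotation s := by
  unfold pvIsJunitAnnotationLine isJunitMethodAnnotation
  rw [hs]
  cases hsw : PySem.Str.startswith s "@" with
  | false => simp only [hsw, Bool.false_and, Bool.not_false, if_true]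
  | true =>
    simp only [hsw, Bool.not_true, Bool.false_eq_true, if_false, Bool.true_and,
      pv_pyGet_zero, pv_pyGet_neg_one, pv_names_agree]
    generalize PySem.Str.strip
        ((((PySem.Str.splitMax? (PySem.Str.slice s (some 1) none) "(" 1).getD []).headD "")) = token
    generalize ((((PySem.Str.split? token ".").getD []).getLast?).getD "") = lastTok
    cases h : (token == "") <;> simp

-- B's declaration predicate is A's, on every line
lemma pv_decl_helpers_agree (s : String) :
    pvIsMethodDeclLine s = looksLikeJavaMethodDeclaration s := by
  unfold pvIsMethodDeclLine looksLikeJavaMethodDeclaration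
  simp only [pv_pyGet_zero]
  have hall : (["class ", "interface ", "enum ", "record ", "if ", "for ", "while ", "switch ",
      "catch "] : List String).all (fun k => !PySem.Str.isIn k s)
      = !(["class ", "interface ", "enum ", "record ", "if ", "for ", "while ", "switch ",
      "catch "] : List String).any (fun token => PySem.Str.isIn token s) := by
    simp
  rw [hall]
  generalize PySem.Str.strip (((PySem.Str.splitMax? s "(" 1).getD []).headD "") = head
  cases h1 : PySem.Str.isIn "(" s <;> cases h2 : PySem.Str.isIn ")" s <;>
    cases h3 : PySem.Str.isIn ";" s <;>
    cases h4 : ((["class ", "interface ", "enum ", "record ", "if ", "for ", "while ", "switch ",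
      "catch "] : List String).any (fun token => PySem.Str.isIn token s)) <;>
    cases h5 : (head == "") <;>
    simp

-- A's run-scanner (proof-side characterisation of the pending flag)
def pvRunHasJunitRev : List String → Bool
  | [] => false
  | s :: rest =>
    if !PySem.Str.startswith s "@" then false
    else if isJunitMethodAnnotation s then true
    else pvRunHasJunitRev rest

lemma pv_run_agree (l : List String) (h : ∀ s ∈ l, PySem.Str.strip s = s) :
    pvJunitRunRev l = pvRunHasJunitRev l := by
  induction l with
  | nil => rfl
  | cons s rest ih =>
    have hs := h s (by simp)
    simp only [pvJunitRunRev, pvRunHasJunitRev, pv_junit_helpers_agree hs,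
      ih (fun x hx => h x (by simp [hx]))]

-- A's loop body on an already-cleaned (stripped, non-blank, non-comment) line
def pvCore (st : Int × Bool) (s : String) : Int × Bool :=
  if isJunitMethodAnnotation s then (st.1, true)
  else if st.2 && PySem.Str.startswith s "@" then st
  else if st.2 && looksLikeJavaMethodDeclaration s then (st.1 + 1, false)
  else (st.1, false)

-- the common characterisation both loops compute: walking the cleaned lines with the
-- reversed already-seen prefix at hand
def pvBsum : List String → List String → Int
  | [], _ => 0
  | s :: rest, rpre =>
    (if !PySem.Str.startswith s "@" && looksLikeJavaMethodDeclaration s && pvRunHasJunitRev rpre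
     then 1 else 0) + pvBsum rest (s :: rpre)

lemma pv_strip_idem_chars (s : List Char) :
    PySem.Chars.strip (PySem.Chars.strip s) = PySem.Chars.strip s := by
  unfold PySem.Chars.strip
  set t := PySem.Chars.lstrip s with ht
  have h1 : PySem.Chars.lstrip (PySem.Chars.rstrip t) = PySem.Chars.rstrip t := by
    cases hcase : PySem.Chars.rstrip t with
    | nil => simp [PySem.Chars.lstrip]
    | cons x u =>
      have hpref : (x :: u) <+: t := by
        rw [← hcase]
        unfold PySem.Chars.rstrip
        obtain ⟨pre, hpre⟩ := List.dropWhile_suffix (l := t.reverse) (p := PySem.Chars.isspace)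
        exact ⟨pre.reverse, by rw [← List.reverse_append, hpre, List.reverse_reverse]⟩
      obtain ⟨rest, hrest⟩ := hpref
      have heq : List.dropWhile PySem.Chars.isspace s = (x :: u) ++ rest := by
        have h := hrest.trans ht
        simp only [PySem.Chars.lstrip] at h
        exact h.symm
      have hne : List.dropWhile PySem.Chars.isspace s ≠ [] := by simp [heq]
      have hx := List.head_dropWhile_not PySem.Chars.isspace hne
      simp only [heq, List.cons_append, List.head_cons] at hx
      simp [PySem.Chars.lstrip, hx]
  have h2 : PySem.Chars.rstrip (PySem.Chars.rstrip t) = PySem.Chars.rstrip t := by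
    unfold PySem.Chars.rstrip
    rw [List.reverse_reverse, List.dropWhile_idempotent]
  rw [h1, h2]

lemma pv_strip_idem (s : String) :
    PySem.Str.strip (PySem.Str.strip s) = PySem.Str.strip s := by
  apply String.toList_inj.mp
  rw [PySem.Str.toList_strip, PySem.Str.toList_strip]
  exact pv_strip_idem_chars s.toList

-- a JUnit annotation line that is already stripped starts with '@'
lemma pv_junit_startswith {s : String} (hs : PySem.Str.strip s = s)
    (hj : isJunitMethodAnnotation s = true) : PySem.Str.startswith s "@" = true := by
  unfold isJunitMethodAnnotation at hj
  rw [hs] at hj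
  cases hsw : PySem.Str.startswith s "@" with
  | true => rfl
  | false => simp only [hsw, Bool.not_false, if_true] at hj; exact hj

-- A-side: the cleaned-line fold with the pending flag computes pvBsum
lemma pv_core_eq_bsum (rest : List String) : ∀ (rpre : List String) (count : Int),
    (∀ s ∈ rest, PySem.Str.strip s = s) →
    (rest.foldl pvCore (count, pvRunHasJunitRev rpre)).1 = count + pvBsum rest rpre := by
  induction rest with
  | nil => intro rpre count _; simp [pvBsum]
  | cons s rest ih =>
    intro rpre count h
    have hs : PySem.Str.strip s = s := h s (by simp)
    have hrest : ∀ x ∈ rest, PySem.Str.strip x = x := fun x hx => h x (by simp [hx])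
    rw [List.foldl_cons]
    by_cases hj : isJunitMethodAnnotation s = true
    · have hsw := pv_junit_startswith hs hj
      have hrun : pvRunHasJunitRev (s :: rpre) = true := by
        simp only [pvRunHasJunitRev, hsw, Bool.not_true, Bool.false_eq_true, if_false, hj, if_true]
      have hc : pvCore (count, pvRunHasJunitRev rpre) s = (count, pvRunHasJunitRev (s :: rpre)) := by
        simp only [pvCore, hj, if_true, hrun]
      rw [hc, ih _ _ hrest]
      simp only [pvBsum, hsw, Bool.not_true, Bool.false_and, Bool.false_eq_true, if_false]
      omega
    · have hj' : isJunitMethodAnnotation s = false := by simpa using hj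
      cases hp : pvRunHasJunitRev rpre with
      | true =>
        cases hsw : PySem.Str.startswith s "@" with
        | true =>
          have hrun : pvRunHasJunitRev (s :: rpre) = true := by
            simp only [pvRunHasJunitRev, hsw, Bool.not_true, Bool.false_eq_true, if_false,
              hj', hp]
          have hc : pvCore (count, true) s
              = (count, pvRunHasJunitRev (s :: rpre)) := by
            simp only [pvCore, hj', Bool.false_eq_true, if_false, hsw, Bool.and_self,
              if_true, hrun]
          rw [hc, ih _ _ hrest]
          simp only [pvBsum, hsw, Bool.not_true, Bool.false_and, Bool.false_eq_true, if_false]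
          omega
        | false =>
          have hrun : pvRunHasJunitRev (s :: rpre) = false := by
            simp only [pvRunHasJunitRev, hsw, Bool.not_false, if_true]
          cases hl : looksLikeJavaMethodDeclaration s with
          | true =>
            have hc : pvCore (count, true) s
                = (count + 1, pvRunHasJunitRev (s :: rpre)) := by
              simp only [pvCore, hj', Bool.false_eq_true, if_false, hsw, Bool.and_false,
                hl, Bool.and_true, if_true, hrun]
            rw [hc, ih _ _ hrest]
            simp only [pvBsum, hsw, Bool.not_false, hl, hp, Bool.and_self, if_true]
            omega
          | false =>
            have hc : pvCore (count, true) s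
                = (count, pvRunHasJunitRev (s :: rpre)) := by
              simp only [pvCore, hj', Bool.false_eq_true, if_false, hsw, Bool.and_false,
                hl, hrun]
            rw [hc, ih _ _ hrest]
            simp [pvBsum, hl]
      | false =>
        have hrun : pvRunHasJunitRev (s :: rpre) = false := by
          cases hsw : PySem.Str.startswith s "@" with
          | true => simp only [pvRunHasJunitRev, hsw, Bool.not_true, Bool.false_eq_true,
              if_false, hj', hp]
          | false => simp only [pvRunHasJunitRev, hsw, Bool.not_false, if_true]
        have hc : pvCore (count, false) s
            = (count, pvRunHasJunitRev (s :: rpre)) := by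
          simp only [pvCore, hj', Bool.false_eq_true, if_false, Bool.false_and, hrun]
        rw [hc, ih _ _ hrest]
        simp only [pvBsum, hp, Bool.and_false, Bool.false_eq_true, if_false]
        omega

lemma pv_cleaned_stripped (content : String) :
    ∀ s ∈ cleanedJavaLines content, PySem.Str.strip s = s := by
  intro s hsmem
  have hmap := List.mem_of_mem_filter hsmem
  obtain ⟨l, _, hl⟩ := List.mem_map.mp hmap
  rw [← hl]
  exact pv_strip_idem l

-- B-side: the enumerate fold with backward scans computes pvBsum
lemma pv_alt_eq_bsum (cleaned : List String) (hstr : ∀ s ∈ cleaned, PySem.Str.strip s = s)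
    (rest : List String) :
    ∀ (rpre : List String) (total : Int), cleaned = rpre.reverse ++ rest →
    ((PySem.List.enumerate rest (rpre.length : Int)).foldl (fun (total : Int) p =>
        if !PySem.Str.startswith p.2 "@" && pvIsMethodDeclLine p.2 &&
            pvAnnotationRunHasJunit (PySem.List.slice cleaned none (some p.1)) then total + 1
        else total) total) = total + pvBsum rest rpre := by
  induction rest with
  | nil => intro rpre total _; simp [PySem.List.enumerate, pvBsum]
  | cons s rest ih =>
    intro rpre total hcl
    rw [PySem.List.enumerate_cons, List.foldl_cons]
    have hslice : PySem.List.slice cleaned none (some (rpre.length : Int)) = rpre.reverse := by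
      rw [PySem.List.slice_to cleaned (Int.natCast_nonneg _), Int.toNat_natCast, hcl]
      exact List.take_left' (by simp)
    have hnext : ((rpre.length : Int) + 1) = (((s :: rpre).length : Int)) := by
      simp [List.length_cons]
    have hcl' : cleaned = (s :: rpre).reverse ++ rest := by rw [hcl]; simp
    have hrpre : ∀ x ∈ rpre, PySem.Str.strip x = x := by
      intro x hx
      exact hstr x (by rw [hcl]; simp [hx])
    have hrun : pvAnnotationRunHasJunit
        (PySem.List.slice cleaned none (some ((rpre.length : Int)))) = pvRunHasJunitRev rpre := by
      rw [hslice, pvAnnotationRunHasJunit, List.reverse_reverse]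
      exact pv_run_agree rpre hrpre
    have hcond : (!PySem.Str.startswith s "@" && pvIsMethodDeclLine s &&
        pvAnnotationRunHasJunit (PySem.List.slice cleaned none (some ((rpre.length : Int))))) =
        (!PySem.Str.startswith s "@" && looksLikeJavaMethodDeclaration s
          && pvRunHasJunitRev rpre) := by
      rw [hrun, pv_decl_helpers_agree]
    simp only []
    rw [hcond, hnext]
    cases hc : (!PySem.Str.startswith s "@" && looksLikeJavaMethodDeclaration s
        && pvRunHasJunitRev rpre) with
    | true =>
      rw [if_pos rfl, ih _ _ hcl']
      simp only [pvBsum, hc, if_true]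
      omega
    | false =>
      rw [if_neg (by simp), ih _ _ hcl']
      simp only [pvBsum, hc, Bool.false_eq_true, if_false]
      omega

lemma pv_A_eq_cleaned_fold (content : String) :
    count_declared_junit_tests_py content
      = ((cleanedJavaLines content).foldl pvCore (0, false)).1 := by
  unfold count_declared_junit_tests_py cleanedJavaLines
  rw [← PySem.List.foldl_if_eq_foldl_filter
        (fun s => !(s == "") && !PySem.Str.startswith s "//") pvCore, List.foldl_map]
  congr 1
  apply PySem.List.foldl_congr_mem
  intro acc line _
  by_cases h1 : (PySem.Str.strip line == "") = true
  · simp only [h1, Bool.true_or, if_true, Bool.not_true, Bool.false_and,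
      Bool.false_eq_true, if_false]
  · by_cases h2 : PySem.Str.startswith (PySem.Str.strip line) "//" = true
    · simp only [h1, h2, Bool.or_true, if_true, Bool.not_true, Bool.and_false,
        Bool.false_eq_true, if_false]
    · simp only [Bool.not_eq_true] at h1 h2
      simp only [h1, h2, Bool.or_false, Bool.false_eq_true, if_false, Bool.not_false,
        Bool.and_self, if_true]
      rfl

-- ===== VERDICT (by name: the statement is the Claim_ definition above) =====
theorem count_declared_junit_tests_py_spec : Claim_equal_count_declared_junit_tests_py := by
  intro content _
  unfold Spec_count_declared_junit_tests_py
  have hA : count_declared_junit_tests_py content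
      = 0 + pvBsum (cleanedJavaLines content) [] := by
    rw [pv_A_eq_cleaned_fold]
    rw [show ((0 : Int), false) = ((0 : Int), pvRunHasJunitRev []) from rfl]
    exact pv_core_eq_bsum _ [] 0 (pv_cleaned_stripped content)
  have hB : count_declared_junit_tests_py_alt content
      = 0 + pvBsum (cleanedJavaLines content) [] := by
    unfold count_declared_junit_tests_py_alt
    exact pv_alt_eq_bsum (cleanedJavaLines content) (pv_cleaned_stripped content)
      (cleanedJavaLines content) [] 0 rfl
  rw [hA, hB]
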